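-- pv_equiv track=rewrite | github.com/ScumbagJones/Webscraper-Site-Analyzer | examples/intelligent_site_mapper.py | _filter_relevant_links
-- ===== SOURCE A (Python) =====
-- from typing import Set, List, Dict
--
-- def _filter_relevant_links(links: List[str], content_type: str) -> List[str]:
--     """
--     Intelligently filter links based on current page content type
--
--     E.g., if on product listing page, prioritize product detail pages
--     If on artist page, prioritize album pages
--     """
--     # Limit to prevent queue explosion
--     MAX_LINKS = 20
--
--     # Filter patterns based on content type
--     if content_type == 'productListing':
--         # Prioritize product pages
--         patterns = ['/product/', '/item/', '/p/']
--     elif content_type == 'musicAlbum':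
--         # Prioritize album and artist pages
--         patterns = ['/album/', '/release/', '/artist/', '/music/']
--     elif content_type == 'blogPost':
--         # Prioritize other blog posts
--         patterns = ['/blog/', '/post/', '/article/', '/20']  # 20 for dates like 2024
--     elif content_type == 'documentation':
--         # Prioritize doc pages
--         patterns = ['/docs/', '/api/', '/guide/', '/tutorial/']
--     elif content_type == 'portfolio':
--         # Prioritize project pages
--         patterns = ['/project/', '/work/', '/case-study/']
--     elif content_type == 'videoGallery':
--         # Prioritize video pages
--         patterns = ['/video/', '/watch/', '/v/']
--     else:
--         # Generic - take everything
--         return links[:MAX_LINKS]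
--
--     # Filter links matching patterns
--     relevant = [
--         link for link in links
--         if any(pattern in link.lower() for pattern in patterns)
--     ]
--
--     # If too few, add some non-matching links
--     if len(relevant) < 5:
--         non_relevant = [link for link in links if link not in relevant]
--         relevant.extend(non_relevant[:MAX_LINKS - len(relevant)])
--
--     return relevant[:MAX_LINKS]
-- ===== SOURCE B (Python) =====
-- _PATTERNS = {
--     'productListing': ['/product/', '/item/', '/p/'],
--     'musicAlbum': ['/album/', '/release/', '/artist/', '/music/'],
--     'blogPost': ['/blog/', '/post/', '/article/', '/20'],
--     'documentation': ['/docs/', '/api/', '/guide/', '/tutorial/'],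
--     'portfolio': ['/project/', '/work/', '/case-study/'],
--     'videoGallery': ['/video/', '/watch/', '/v/'],
-- }
--
-- def _filter_relevant_links(links, content_type):
--     MAX_LINKS = 20
--     patterns = _PATTERNS.get(content_type)
--     if patterns is None:
--         # Generic - take everything
--         return links[:MAX_LINKS]
--     # One pass: partition into pattern-matching links and the rest
--     relevant, others = [], []
--     for link in links:
--         low = link.lower()
--         (relevant if any(p in low for p in patterns) else others).append(link)
--     if len(relevant) >= 5:
--         return relevant[:MAX_LINKS]
--     # too few matches: pad with non-matching links, keeping original order
--     return (relevant + others)[:MAX_LINKS]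
-- ===== Notes on version B (the rewrite author's own statement) =====
-- stated objective: simpler
-- what changed: Replaces the if/elif pattern dispatch with a dict lookup and the two list comprehensions (the second re-scanning the whole relevant list per link) with a single partition pass, padding by concatenation-then-cut instead of a computed extend slice.
import Mathlib
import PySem

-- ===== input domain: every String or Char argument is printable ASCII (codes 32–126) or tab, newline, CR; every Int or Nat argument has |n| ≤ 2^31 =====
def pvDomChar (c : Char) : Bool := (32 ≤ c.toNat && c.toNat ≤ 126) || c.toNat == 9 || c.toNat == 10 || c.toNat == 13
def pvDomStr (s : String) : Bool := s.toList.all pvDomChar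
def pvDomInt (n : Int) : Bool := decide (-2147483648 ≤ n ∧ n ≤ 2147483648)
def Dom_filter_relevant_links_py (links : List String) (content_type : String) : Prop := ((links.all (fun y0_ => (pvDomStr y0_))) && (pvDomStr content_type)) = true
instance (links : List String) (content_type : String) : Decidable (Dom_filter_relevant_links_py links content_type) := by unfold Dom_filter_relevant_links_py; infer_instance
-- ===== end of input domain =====

-- B replaces A's if/elif pattern dispatch by a dict lookup and A's two list comprehensions
-- (the second re-scanning the relevant list per link) by a single partition pass, padding by
-- concatenation-then-cut; objective: simpler.


-- ===== PORT A =====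
-- 'any(pattern in link.lower() for pattern in patterns)'
def pvMatch (patterns : List String) (link : String) : Bool :=
  patterns.any (fun pattern => PySem.Str.isIn pattern (PySem.Str.lower link))

-- the tail of A after 'patterns' was chosen: the two comprehensions, the pad, the final cut
def pvFilterA (links : List String) (patterns : List String) : List String :=
  let relevant := links.filter (fun link => pvMatch patterns link)
  let relevant2 :=
    if relevant.length < 5 then
      let non_relevant := links.filter (fun link => !(relevant.contains link))
      relevant ++ PySem.List.slice non_relevant none (some (20 - (relevant.length : Int)))
    else relevant
  PySem.List.slice relevant2 none (some 20)

def filter_relevant_links_py (links : List String) (content_type : String) : List String :=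
  if content_type == "productListing" then
    pvFilterA links ["/product/", "/item/", "/p/"]
  else if content_type == "musicAlbum" then
    pvFilterA links ["/album/", "/release/", "/artist/", "/music/"]
  else if content_type == "blogPost" then
    pvFilterA links ["/blog/", "/post/", "/article/", "/20"]
  else if content_type == "documentation" then
    pvFilterA links ["/docs/", "/api/", "/guide/", "/tutorial/"]
  else if content_type == "portfolio" then
    pvFilterA links ["/project/", "/work/", "/case-study/"]
  else if content_type == "videoGallery" then
    pvFilterA links ["/video/", "/watch/", "/v/"]
  else
    PySem.List.slice links none (some 20)

-- ===== PORT B =====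
def pvPATTERNS : PySem.Dict String (List String) :=
  PySem.Dict.ofList
    [("productListing", ["/product/", "/item/", "/p/"]),
     ("musicAlbum", ["/album/", "/release/", "/artist/", "/music/"]),
     ("blogPost", ["/blog/", "/post/", "/article/", "/20"]),
     ("documentation", ["/docs/", "/api/", "/guide/", "/tutorial/"]),
     ("portfolio", ["/project/", "/work/", "/case-study/"]),
     ("videoGallery", ["/video/", "/watch/", "/v/"])]

def filter_relevant_links_py_alt (links : List String) (content_type : String) : List String :=
  match pvPATTERNS.get? content_type with
  | none => PySem.List.slice links none (some 20)
  | some patterns =>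
    let part := links.foldl
      (fun (acc : List String × List String) link =>
        let low := PySem.Str.lower link
        if patterns.any (fun p => PySem.Str.isIn p low) then (acc.1 ++ [link], acc.2)
        else (acc.1, acc.2 ++ [link]))
      ([], [])
    if 5 ≤ part.1.length then PySem.List.slice part.1 none (some 20)
    else PySem.List.slice (part.1 ++ part.2) none (some 20)

-- ===== PRECONDITION & SPEC =====
def Spec_filter_relevant_links_py (links : List String) (content_type : String) (out : List String) : Prop := out = filter_relevant_links_py_alt links content_type
instance (links : List String) (content_type : String) (out : List String) : Decidable (Spec_filter_relevant_links_py links content_type out) := by unfold Spec_filter_relevant_links_py; infer_instance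

-- ===== CLAIM (what is proved, stated in full; the proofs are below) =====
def Claim_equal_filter_relevant_links_py : Prop := ∀ (links : List String) (content_type : String), Dom_filter_relevant_links_py links content_type → Spec_filter_relevant_links_py links content_type (filter_relevant_links_py links content_type)

-- ===== LEMMAS AND PROOFS =====

-- B's partition fold, started from any accumulator, appends the two filters.
theorem pv_fold_partition (patterns links : List String) (r o : List String) :
    links.foldl
      (fun (acc : List String × List String) link =>
        let low := PySem.Str.lower link
        if patterns.any (fun p => PySem.Str.isIn p low) then (acc.1 ++ [link], acc.2)
        else (acc.1, acc.2 ++ [link]))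
      (r, o)
    = (r ++ links.filter (fun link => pvMatch patterns link),
       o ++ links.filter (fun link => !(pvMatch patterns link))) := by
  induction links generalizing r o with
  | nil => simp
  | cons x xs ih =>
    by_cases h : pvMatch patterns x
    · have h' : (patterns.any fun p => PySem.Str.isIn p (PySem.Str.lower x)) = true := h
      simp only [List.foldl_cons, List.filter_cons, h, h', if_true, Bool.not_true,
        Bool.false_eq_true, if_false, ih, List.append_assoc, List.singleton_append]
    · have hm : pvMatch patterns x = false := eq_false_of_ne_true h
      have h' : (patterns.any fun p => PySem.Str.isIn p (PySem.Str.lower x)) = false := hm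
      simp only [List.foldl_cons, List.filter_cons, hm, h', Bool.not_false, if_true,
        Bool.false_eq_true, if_false, ih, List.append_assoc, List.singleton_append]

-- 'link not in relevant' scans A's filtered list; inside the comprehension over links it is
-- exactly the negated pattern test, since matching is a function of the link string alone.
theorem pv_non_relevant (patterns links : List String) :
    links.filter (fun link => !((links.filter (fun l => pvMatch patterns l)).contains link))
    = links.filter (fun link => !(pvMatch patterns link)) := by
  apply List.filter_congr
  intro x hx
  by_cases h : pvMatch patterns x
  · simp [List.mem_filter, hx, h]
  · simp [List.mem_filter, h]

-- A's pad-then-cut equals B's concat-then-cut when relevant is short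
theorem pv_pad_cut (r o : List String) (h : r.length < 5) :
    PySem.List.slice (r ++ PySem.List.slice o none (some (20 - (r.length : Int)))) none (some 20)
    = PySem.List.slice (r ++ o) none (some 20) := by
  rw [PySem.List.slice_to _ (by omega : (0:Int) ≤ 20 - (r.length : Int)),
    PySem.List.slice_to _ (by norm_num : (0:Int) ≤ 20),
    PySem.List.slice_to _ (by norm_num : (0:Int) ≤ 20)]
  rw [List.take_append, List.take_append, List.take_take]
  congr 2
  omega

-- for each chosen pattern list, A's tail equals B's tail
theorem pv_body_eq (patterns links : List String) :
    pvFilterA links patterns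
    = (let part := links.foldl
        (fun (acc : List String × List String) link =>
          let low := PySem.Str.lower link
          if patterns.any (fun p => PySem.Str.isIn p low) then (acc.1 ++ [link], acc.2)
          else (acc.1, acc.2 ++ [link]))
        ([], [])
       if 5 ≤ part.1.length then PySem.List.slice part.1 none (some 20)
       else PySem.List.slice (part.1 ++ part.2) none (some 20)) := by
  show pvFilterA links patterns =
    (if 5 ≤ (links.foldl _ (([] : List String), ([] : List String))).1.length then _ else _)
  rw [pv_fold_partition]
  show pvFilterA links patterns =
    (if 5 ≤ ([] ++ links.filter (fun link => pvMatch patterns link)).length then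
      PySem.List.slice ([] ++ links.filter (fun link => pvMatch patterns link)) none (some 20)
     else PySem.List.slice (([] ++ links.filter (fun link => pvMatch patterns link)) ++
       ([] ++ links.filter (fun link => !(pvMatch patterns link)))) none (some 20))
  simp only [List.nil_append]
  show PySem.List.slice
          (if (links.filter (fun link => pvMatch patterns link)).length < 5 then
            links.filter (fun link => pvMatch patterns link) ++
              PySem.List.slice
                (links.filter (fun link => !((links.filter (fun l => pvMatch patterns l)).contains link)))
                none (some (20 - ((links.filter (fun link => pvMatch patterns link)).length : Int)))
          else links.filter (fun link => pvMatch patterns link)) none (some 20) = _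
  by_cases h : (links.filter (fun link => pvMatch patterns link)).length < 5
  · rw [if_pos h, pv_non_relevant, pv_pad_cut _ _ h,
      if_neg (show ¬ 5 ≤ (links.filter (fun link => pvMatch patterns link)).length by omega)]
  · rw [if_neg h, if_pos (show 5 ≤ (links.filter (fun link => pvMatch patterns link)).length by omega)]

-- the dict lookup misses exactly when A's if/elif chain falls through
theorem pv_get_none (ct : String)
    (h1 : ¬ (ct == "productListing") = true) (h2 : ¬ (ct == "musicAlbum") = true)
    (h3 : ¬ (ct == "blogPost") = true) (h4 : ¬ (ct == "documentation") = true)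
    (h5 : ¬ (ct == "portfolio") = true) (h6 : ¬ (ct == "videoGallery") = true) :
    pvPATTERNS.get? ct = none := by
  have e : ∀ a b : String, ¬ (a == b) = true → (b == a) = false := by
    intro a b h
    rw [BEq.comm]
    exact eq_false_of_ne_true h
  show (PySem.Dict.mk [("productListing", ["/product/", "/item/", "/p/"]),
     ("musicAlbum", ["/album/", "/release/", "/artist/", "/music/"]),
     ("blogPost", ["/blog/", "/post/", "/article/", "/20"]),
     ("documentation", ["/docs/", "/api/", "/guide/", "/tutorial/"]),
     ("portfolio", ["/project/", "/work/", "/case-study/"]),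
     ("videoGallery", ["/video/", "/watch/", "/v/"])]).get? ct = none
  rw [PySem.Dict.get?_mk_cons, if_neg (by simp [e _ _ h1])]
  rw [PySem.Dict.get?_mk_cons, if_neg (by simp [e _ _ h2])]
  rw [PySem.Dict.get?_mk_cons, if_neg (by simp [e _ _ h3])]
  rw [PySem.Dict.get?_mk_cons, if_neg (by simp [e _ _ h4])]
  rw [PySem.Dict.get?_mk_cons, if_neg (by simp [e _ _ h5])]
  rw [PySem.Dict.get?_mk_cons, if_neg (by simp [e _ _ h6])]
  rfl

-- ===== VERDICT (by name: the statement is the Claim_ definition above) =====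
theorem filter_relevant_links_py_spec : Claim_equal_filter_relevant_links_py := by
  intro links ct _
  unfold Spec_filter_relevant_links_py filter_relevant_links_py filter_relevant_links_py_alt
  by_cases h1 : ct == "productListing"
  · rw [eq_of_beq h1, if_pos (by decide),
      show pvPATTERNS.get? "productListing" = some ["/product/", "/item/", "/p/"] from rfl]
    exact pv_body_eq _ _
  · rw [if_neg h1]
    by_cases h2 : ct == "musicAlbum"
    · rw [eq_of_beq h2, if_pos (by decide),
        show pvPATTERNS.get? "musicAlbum" = some ["/album/", "/release/", "/artist/", "/music/"] from rfl]
      exact pv_body_eq _ _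
    · rw [if_neg h2]
      by_cases h3 : ct == "blogPost"
      · rw [eq_of_beq h3, if_pos (by decide),
          show pvPATTERNS.get? "blogPost" = some ["/blog/", "/post/", "/article/", "/20"] from rfl]
        exact pv_body_eq _ _
      · rw [if_neg h3]
        by_cases h4 : ct == "documentation"
        · rw [eq_of_beq h4, if_pos (by decide),
            show pvPATTERNS.get? "documentation" = some ["/docs/", "/api/", "/guide/", "/tutorial/"] from rfl]
          exact pv_body_eq _ _
        · rw [if_neg h4]
          by_cases h5 : ct == "portfolio"
          · rw [eq_of_beq h5, if_pos (by decide),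
              show pvPATTERNS.get? "portfolio" = some ["/project/", "/work/", "/case-study/"] from rfl]
            exact pv_body_eq _ _
          · rw [if_neg h5]
            by_cases h6 : ct == "videoGallery"
            · rw [eq_of_beq h6, if_pos (by decide),
                show pvPATTERNS.get? "videoGallery" = some ["/video/", "/watch/", "/v/"] from rfl]
              exact pv_body_eq _ _
            · rw [if_neg h6, pv_get_none ct h1 h2 h3 h4 h5 h6]
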